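-- pv_equiv track=rewrite | github.com/F3mte/L-Zaawansowane-techniki-optymalizacji | 1606dodatek.py | calculate
-- ===== SOURCE A (Python) =====
-- def calculate(permutation, table):
--     """
--     permutation - konkretna kolejnosc zadan do realizacji,
--     table - oryginalna tablica, nie uporzadkowana, jest to wazne, bo w kilku miejscach poslugujemy sie uporzadkowanna
--     """
--     m = [0] * len(table[0])
--     for i in permutation:  # Dla każdego zadania z danej permutacji
--         for j in range(0, len(table[0])):  # Dla każdej maszyny
--             if j == 0:
--                 m[j] += table[i-1][j]  # Dla pierwszej maszyny dodaj czas przygotowania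
--             else:
--                 m[j] = max(m[j], m[j-1]) + table[i-1][j]  # Dla kolejnych znajdź wg. wzoru 2.8 http://radoslaw.idzikowski.staff.iiar.pwr.wroc.pl/instruction/zto/problemy.pdf
--     return max(m)
-- ===== SOURCE B (Python) =====
-- def calculate(permutation, table):
--     # Machine-by-machine flow-shop makespan: build each machine's column of
--     # completion times from the previous machine's column; return the max of
--     # the final-job completion over all machines.
--     nm = len(table[0])
--     if not permutation:
--         return 0
--     # machine 0: running cumulative sum of processing times
--     prev = []
--     c = 0
--     for i in permutation:
--         c = c + table[i - 1][0]
--         prev.append(c)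
--     best = c
--     for j in range(1, nm):
--         cur = []
--         c = 0
--         for i, p in zip(permutation, prev):
--             c = max(c, p) + table[i - 1][j]
--             cur.append(c)
--         best = max(best, c)
--         prev = cur
--     return best
-- ===== Notes on version B (the rewrite author's own statement) =====
-- stated objective: alternative
-- what changed: B sweeps the schedule machine-by-machine, building each machine's full column of job completion times from the previous machine's column and tracking the running maximum of the columns' last entries, instead of A's job-by-job in-place update of one per-machine vector; Pre_ excludes only inputs on which A raises (empty table, zero machines, or an out-of-range/too-short row access).
import Mathlib
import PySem

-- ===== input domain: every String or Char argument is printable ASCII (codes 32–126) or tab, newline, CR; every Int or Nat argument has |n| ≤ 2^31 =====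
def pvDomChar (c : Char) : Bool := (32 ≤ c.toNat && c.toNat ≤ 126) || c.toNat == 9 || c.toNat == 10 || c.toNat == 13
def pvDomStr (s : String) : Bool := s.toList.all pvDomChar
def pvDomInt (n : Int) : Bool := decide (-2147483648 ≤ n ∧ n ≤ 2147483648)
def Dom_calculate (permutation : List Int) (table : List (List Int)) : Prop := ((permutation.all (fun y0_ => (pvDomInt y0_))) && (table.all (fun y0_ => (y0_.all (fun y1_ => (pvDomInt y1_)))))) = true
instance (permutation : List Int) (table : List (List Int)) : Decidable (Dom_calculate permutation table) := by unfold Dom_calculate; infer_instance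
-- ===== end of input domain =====

-- B differs from A only in loop organisation (machine-by-machine columns instead of a
-- job-by-job vector); the equivalence is about the return value (neither mutates its input).

-- ===== PORT A =====
-- A, job-major: one vector m of per-machine completion times, updated in place per job.
def calculate (permutation : List Int) (table : List (List Int)) : Int :=
  let nm := ((PySem.List.pyGet? table 0).getD []).length
  let m := permutation.foldl (fun (m : List Int) i =>
      (PySem.List.pyRange 0 (nm : Int) 1).foldl (fun (m : List Int) j =>
        if j = 0 then
          PySem.List.pySetD m j (PySem.List.pyGetD m j 0 +
            PySem.List.pyGetD (PySem.List.pyGetD table (i - 1) []) j 0)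
        else
          PySem.List.pySetD m j (max (PySem.List.pyGetD m j 0) (PySem.List.pyGetD m (j - 1) 0) +
            PySem.List.pyGetD (PySem.List.pyGetD table (i - 1) []) j 0)) m)
    (List.replicate nm 0)
  (PySem.List.max? m (fun y => y)).getD 0

-- ===== PORT B =====
-- B, machine-major: machine 0 is a running cumulative sum; every next machine's column is
-- built from the previous machine's column; best tracks each column's last entry.
def calculate_alt (permutation : List Int) (table : List (List Int)) : Int :=
  let nm := (PySem.List.pyGetD table 0 []).length
  if permutation = [] then 0
  else
    let p0 := permutation.foldl (fun (acc : List Int × Int) i =>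
        let c := acc.2 + PySem.List.pyGetD (PySem.List.pyGetD table (i - 1) []) 0 0
        (acc.1 ++ [c], c)) ([], 0)
    let st := (PySem.List.pyRange 1 (nm : Int) 1).foldl
      (fun (st : List Int × Int) j =>
        let col := (permutation.zip st.1).foldl (fun (acc : List Int × Int) ip =>
            let c := max acc.2 ip.2 +
              PySem.List.pyGetD (PySem.List.pyGetD table (ip.1 - 1) []) j 0
            (acc.1 ++ [c], c)) ([], 0)
        (col.1, max st.2 col.2)) (p0.1, p0.2)
    st.2

-- ===== PRECONDITION & SPEC =====
-- Pre_ excludes exactly the inputs on which the Python A raises: an empty table or an empty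
-- first row (IndexError on table[0][...] / ValueError on max([])), and any job index whose
-- row access table[i-1] is out of range or whose row is shorter than the first row.
def Pre_calculate (permutation : List Int) (table : List (List Int)) : Prop :=
  table ≠ [] ∧ 0 < (table.headD []).length ∧
  ∀ i ∈ permutation, PySem.Raise.InRange table.length (i - 1) ∧
    (table.headD []).length ≤ (PySem.List.pyGetD table (i - 1) []).length
instance (permutation : List Int) (table : List (List Int)) : Decidable (Pre_calculate permutation table) := by unfold Pre_calculate; infer_instance

def pvWitness_calculate : List Int × List (List Int) := ([2, 1], [[2, 3], [1, 4]])

def Spec_calculate (permutation : List Int) (table : List (List Int)) (out : Int) : Prop := out = calculate_alt permutation table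
instance (permutation : List Int) (table : List (List Int)) (out : Int) : Decidable (Spec_calculate permutation table out) := by unfold Spec_calculate; infer_instance

-- ===== CLAIM (what is proved, stated in full; the proofs are below) =====
def Claim_equal_calculate : Prop := ∀ (permutation : List Int) (table : List (List Int)), Dom_calculate permutation table → Pre_calculate permutation table → Spec_calculate permutation table (calculate permutation table)

-- ===== LEMMAS AND PROOFS =====

-- processing time of the job with (1-based, possibly wrapping) id i on machine j
def gfunD (table : List (List Int)) (i : Int) (j : Nat) : Int :=
  (PySem.List.pyGetD table (i - 1) []).getD j 0

-- processing time of the k-th job of the permutation on machine j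
def tkD (permutation : List Int) (table : List (List Int)) (k j : Nat) : Int :=
  gfunD table (permutation.getD k 0) j

-- The flow-shop completion-time matrix: Cm t k j = completion time of the k-th job
-- (1-based; k = 0 is the "no jobs yet" boundary, value 0) on machine j.
def Cm (t : Nat → Nat → Int) : Nat → Nat → Int
  | 0, _ => 0
  | k + 1, 0 => Cm t k 0 + t k 0
  | k + 1, j + 1 => max (Cm t (k + 1) j) (Cm t k (j + 1)) + t k (j + 1)
  termination_by k j => (k, j)

-- one job-major sweep (A's inner loop) as a function of the machine index
def rowStep (g f : Nat → Int) : Nat → Int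
  | 0 => f 0 + g 0
  | j + 1 => max (rowStep g f j) (f (j + 1)) + g (j + 1)

-- A's inner-loop body, normalised to Nat indices
def GA (table : List (List Int)) (i : Int) (m : List Int) (j : Nat) : List Int :=
  m.set j (if j = 0 then m.getD 0 0 + gfunD table i 0
           else max (m.getD j 0) (m.getD (j - 1) 0) + gfunD table i j)

-- B's machine-loop body, normalised to Nat indices
def GB (table : List (List Int)) (perm : List Int) (st : List Int × Int) (jm : Nat) : List Int × Int :=
  let col := (perm.zip st.1).foldl (fun acc ip => (acc.1 ++ [max acc.2 ip.2 + gfunD table ip.1 jm],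
      max acc.2 ip.2 + gfunD table ip.1 jm)) ([], 0)
  (col.1, max st.2 col.2)

-- running maximum of the final-job completion over machines 0..a
def bestVal (t : Nat → Nat → Int) (n : Nat) (a : Nat) : Int :=
  (List.range' 1 a).foldl (fun bb jj => max bb (Cm t n jj)) (Cm t n 0)

theorem Cm_succ (t : Nat → Nat → Int) (k j : Nat) :
    Cm t (k + 1) j = rowStep (t k) (Cm t k) j := by
  induction j with
  | zero => rw [Cm, rowStep]
  | succ j ih => rw [Cm, rowStep, ih, max_comm]

theorem getD_set_lt {m : List Int} {a : Nat} (v : Int) (ha : a < m.length) (jj : Nat) :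
    (m.set a v).getD jj 0 = if jj = a then v else m.getD jj 0 := by
  rw [List.getD_eq_getElem?_getD, List.getD_eq_getElem?_getD, List.getElem?_set]
  by_cases h : jj = a
  · subst h; simp [ha]
  · simp [Ne.symm h, h]

theorem drop_cons_lt {α : Type} {perm ys : List α} {i : α} {k : Nat}
    (h : perm.drop k = i :: ys) : k < perm.length := by
  by_contra hc
  rw [List.drop_eq_nil_of_le (by omega)] at h
  simp at h

theorem drop_cons_getD {α : Type} {perm ys : List α} {i : α} {d : α} {k : Nat}
    (h : perm.drop k = i :: ys) : perm.getD k d = i := by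
  have h0 : (perm.drop k)[0]?.getD d = i := by rw [h]; rfl
  rw [List.getElem?_drop, Nat.add_zero] at h0
  rw [List.getD_eq_getElem?_getD]
  exact h0

theorem drop_cons_succ {α : Type} {perm ys : List α} {i : α} {k : Nat}
    (h : perm.drop k = i :: ys) : perm.drop (k + 1) = ys := by
  have h2 := List.tail_drop (l := perm) (i := k)
  rw [h] at h2
  simpa using h2.symm

theorem innerA (table : List (List Int)) (i : Int) (nm : Nat) (f : Nat → Int) :
    ∀ (b a : Nat) (m : List Int), a + b = nm → m.length = nm →
    (∀ jj, jj < a → m.getD jj 0 = rowStep (gfunD table i) f jj) →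
    (∀ jj, a ≤ jj → jj < nm → m.getD jj 0 = f jj) →
    ((List.range' a b).foldl (GA table i) m).length = nm ∧
      ∀ jj, jj < nm → ((List.range' a b).foldl (GA table i) m).getD jj 0 =
        rowStep (gfunD table i) f jj := by
  intro b
  induction b with
  | zero =>
    intro a m hab hlen h1 h2
    simp only [List.range', List.foldl_nil]
    exact ⟨hlen, fun jj hj => h1 jj (by omega)⟩
  | succ b ih =>
    intro a m hab hlen h1 h2
    rw [List.range'_succ, List.foldl_cons]
    have ha : a < m.length := by omega
    have hval : ∀ jj, jj < a + 1 → (GA table i m a).getD jj 0 = rowStep (gfunD table i) f jj := by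
      intro jj hj
      rw [GA, getD_set_lt _ ha]
      by_cases hje : jj = a
      · subst hje
        rw [if_pos rfl]
        rcases jj with _ | j
        · rw [if_pos rfl, h2 0 le_rfl (by omega), rowStep]
        · rw [if_neg (Nat.succ_ne_zero j), h2 (j + 1) le_rfl (by omega),
            Nat.add_sub_cancel, h1 j (by omega), rowStep, max_comm]
      · rw [if_neg hje]; exact h1 jj (by omega)
    have hold : ∀ jj, a + 1 ≤ jj → jj < nm → (GA table i m a).getD jj 0 = f jj := by
      intro jj hj hj2
      rw [GA, getD_set_lt _ ha, if_neg (by omega)]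
      exact h2 jj (by omega) hj2
    exact ih (a + 1) (GA table i m a) (by omega) (by simp [GA, hlen]) hval hold

theorem outerA (table : List (List Int)) (perm : List Int) (nm : Nat) :
    ∀ (ys : List Int) (k : Nat) (m : List Int), perm.drop k = ys → k ≤ perm.length →
    m.length = nm →
    (∀ jj, jj < nm → m.getD jj 0 = Cm (tkD perm table) k jj) →
    (ys.foldl (fun m i => (List.range' 0 nm).foldl (GA table i) m) m).length = nm ∧
      ∀ jj, jj < nm →
        (ys.foldl (fun m i => (List.range' 0 nm).foldl (GA table i) m) m).getD jj 0 =
          Cm (tkD perm table) perm.length jj := by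
  intro ys
  induction ys with
  | nil =>
    intro k m hdrop hk hlen hinv
    have : k = perm.length := by
      have := List.drop_eq_nil_iff.mp hdrop; omega
    subst this
    exact ⟨hlen, hinv⟩
  | cons i ys ih =>
    intro k m hdrop hk hlen hinv
    have hklt : k < perm.length := drop_cons_lt hdrop
    rw [List.foldl_cons]
    have hstep := innerA table i nm (Cm (tkD perm table) k) nm 0 m (by omega) hlen
      (by intro jj h; omega) (by intro jj _ h; exact hinv jj h)
    refine ih (k + 1) _ (drop_cons_succ hdrop) (by omega) hstep.1 ?_
    intro jj hj
    rw [hstep.2 jj hj, Cm_succ]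
    have : tkD perm table k = gfunD table i := by
      funext j; rw [tkD, drop_cons_getD hdrop]
    rw [this]

theorem firstB (table : List (List Int)) (perm : List Int) :
    ∀ (ys : List Int) (k : Nat) (acc : List Int × Int), perm.drop k = ys →
    k ≤ perm.length →
    acc.1 = (List.range k).map (fun k' => Cm (tkD perm table) (k' + 1) 0) →
    acc.2 = Cm (tkD perm table) k 0 →
    (ys.foldl (fun acc i => (acc.1 ++ [acc.2 + gfunD table i 0], acc.2 + gfunD table i 0)) acc).1
      = (List.range perm.length).map (fun k' => Cm (tkD perm table) (k' + 1) 0) ∧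
    (ys.foldl (fun acc i => (acc.1 ++ [acc.2 + gfunD table i 0], acc.2 + gfunD table i 0)) acc).2
      = Cm (tkD perm table) perm.length 0 := by
  intro ys
  induction ys with
  | nil =>
    intro k acc hdrop hk h1 h2
    have : k = perm.length := by
      have := List.drop_eq_nil_iff.mp hdrop; omega
    subst this
    exact ⟨h1, h2⟩
  | cons i ys ih =>
    intro k acc hdrop hk h1 h2
    rw [List.foldl_cons]
    refine ih (k + 1) _ (drop_cons_succ hdrop) (by have := drop_cons_lt hdrop; omega) ?_ ?_
    · simp only [h1, h2, List.range_succ, List.map_append, List.map_cons, List.map_nil]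
      have : Cm (tkD perm table) k 0 + gfunD table i 0 = Cm (tkD perm table) (k + 1) 0 := by
        rw [Cm, tkD, drop_cons_getD hdrop]
      rw [this]
    · simp only [h2]
      rw [Cm, tkD, drop_cons_getD hdrop]

theorem colB (table : List (List Int)) (perm : List Int) (jp : Nat) :
    ∀ (ys : List (Int × Int)) (k : Nat) (acc : List Int × Int),
    (perm.zip ((List.range perm.length).map (fun k' => Cm (tkD perm table) (k' + 1) jp))).drop k = ys →
    k ≤ perm.length →
    acc.1 = (List.range k).map (fun k' => Cm (tkD perm table) (k' + 1) (jp + 1)) →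
    acc.2 = Cm (tkD perm table) k (jp + 1) →
    (ys.foldl (fun acc ip => (acc.1 ++ [max acc.2 ip.2 + gfunD table ip.1 (jp + 1)],
        max acc.2 ip.2 + gfunD table ip.1 (jp + 1))) acc).1
      = (List.range perm.length).map (fun k' => Cm (tkD perm table) (k' + 1) (jp + 1)) ∧
    (ys.foldl (fun acc ip => (acc.1 ++ [max acc.2 ip.2 + gfunD table ip.1 (jp + 1)],
        max acc.2 ip.2 + gfunD table ip.1 (jp + 1))) acc).2
      = Cm (tkD perm table) perm.length (jp + 1) := by
  intro ys
  induction ys with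
  | nil =>
    intro k acc hdrop hk h1 h2
    have hnil : perm.length ≤ k := by
      have := List.drop_eq_nil_iff.mp hdrop
      simpa using this
    have : k = perm.length := by omega
    subst this
    exact ⟨h1, h2⟩
  | cons ip ys ih =>
    intro k acc hdrop hk h1 h2
    have hklt : k < perm.length := by
      have := drop_cons_lt hdrop
      simp at this
      omega
    have hzlt : k < (perm.zip ((List.range perm.length).map (fun k' => Cm (tkD perm table) (k' + 1) jp))).length := by
      simp
      omega
    have hentry : (perm.zip ((List.range perm.length).map (fun k' => Cm (tkD perm table) (k' + 1) jp))).getD k (0, 0) = ip :=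
      drop_cons_getD hdrop
    rw [List.getD_eq_getElem _ _ hzlt, List.getElem_zip] at hentry
    have hip1 : ip.1 = perm[k] := by rw [← hentry]
    have hip2 : ip.2 = Cm (tkD perm table) (k + 1) jp := by
      rw [← hentry]
      simp
    have hstep : max acc.2 ip.2 + gfunD table ip.1 (jp + 1) = Cm (tkD perm table) (k + 1) (jp + 1) := by
      rw [h2, hip1, hip2, Cm, max_comm]
      have : tkD perm table k (jp + 1) = gfunD table perm[k] (jp + 1) := by
        rw [tkD, List.getD_eq_getElem _ _ hklt]
      rw [this]
    rw [List.foldl_cons]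
    refine ih (k + 1) _ (drop_cons_succ hdrop) (by omega) ?_ ?_
    · simp only [h1, List.range_succ, List.map_append, List.map_cons, List.map_nil, hstep]
    · simpa using hstep

theorem machB (table : List (List Int)) (perm : List Int) :
    ∀ (b a : Nat) (st : List Int × Int),
    st.1 = (List.range perm.length).map (fun k' => Cm (tkD perm table) (k' + 1) a) →
    st.2 = bestVal (tkD perm table) perm.length a →
    ((List.range' (a + 1) b).foldl (GB table perm) st).1
      = (List.range perm.length).map (fun k' => Cm (tkD perm table) (k' + 1) (a + b)) ∧
    ((List.range' (a + 1) b).foldl (GB table perm) st).2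
      = bestVal (tkD perm table) perm.length (a + b) := by
  intro b
  induction b with
  | zero =>
    intro a st h1 h2
    simpa using ⟨h1, h2⟩
  | succ b ih =>
    intro a st h1 h2
    rw [List.range'_succ, List.foldl_cons]
    have hcol := colB table perm a (perm.zip ((List.range perm.length).map
        (fun k' => Cm (tkD perm table) (k' + 1) a))) 0 ([], 0) (by rw [List.drop_zero])
      (by omega) (by simp) (by rw [Cm])
    have hGB1 : (GB table perm st (a + 1)).1
        = (List.range perm.length).map (fun k' => Cm (tkD perm table) (k' + 1) (a + 1)) := by
      rw [GB, h1]
      exact hcol.1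
    have hGB2 : (GB table perm st (a + 1)).2
        = bestVal (tkD perm table) perm.length (a + 1) := by
      rw [GB, h1, h2]
      simp only [hcol.2]
      rw [bestVal, bestVal, List.range'_1_concat, List.foldl_append, List.foldl_cons,
        List.foldl_nil, Nat.add_comm 1 a]
    have := ih (a + 1) (GB table perm st (a + 1)) hGB1 hGB2
    constructor
    · rw [this.1]; ring_nf
    · rw [this.2]; ring_nf

theorem pyfoldA (table : List (List Int)) (i : Int) (nm : Nat) (m : List Int) :
    (PySem.List.pyRange 0 (nm : Int) 1).foldl (fun (m : List Int) j =>
        if j = 0 then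
          PySem.List.pySetD m j (PySem.List.pyGetD m j 0 +
            PySem.List.pyGetD (PySem.List.pyGetD table (i - 1) []) j 0)
        else
          PySem.List.pySetD m j (max (PySem.List.pyGetD m j 0) (PySem.List.pyGetD m (j - 1) 0) +
            PySem.List.pyGetD (PySem.List.pyGetD table (i - 1) []) j 0)) m
      = (List.range' 0 nm).foldl (GA table i) m := by
  rw [PySem.List.pyRange_one]
  simp only [sub_zero, Int.toNat_natCast]
  rw [List.foldl_map, List.range_eq_range']
  have hf : (fun (m : List Int) (k : Nat) =>
      if (0 + (k : Int)) = 0 then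
        PySem.List.pySetD m (0 + (k : Int)) (PySem.List.pyGetD m (0 + (k : Int)) 0 +
          PySem.List.pyGetD (PySem.List.pyGetD table (i - 1) []) (0 + (k : Int)) 0)
      else
        PySem.List.pySetD m (0 + (k : Int)) (max (PySem.List.pyGetD m (0 + (k : Int)) 0)
            (PySem.List.pyGetD m ((0 + (k : Int)) - 1) 0) +
          PySem.List.pyGetD (PySem.List.pyGetD table (i - 1) []) (0 + (k : Int)) 0)) = GA table i := by
    funext m k
    rcases k with _ | k'
    · simp [GA, gfunD, PySem.List.pyGetD_zero, PySem.List.pySetD_of_nonneg,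
        List.getD_eq_getElem?_getD]
    · have hne : (0 + ((k' + 1 : Nat) : Int)) ≠ 0 := by push_cast; omega
      rw [if_neg hne, GA, if_neg (Nat.succ_ne_zero k')]
      have e1 : (0 + ((k' + 1 : Nat) : Int)) = ((k' + 1 : Nat) : Int) := by push_cast; ring
      have e2 : (0 + ((k' + 1 : Nat) : Int)) - 1 = ((k' : Nat) : Int) := by push_cast; ring
      rw [e2, e1]
      simp only [gfunD, PySem.List.pySetD_natCast, PySem.List.pyGetD_natCast,
        List.getD_eq_getElem?_getD, Nat.add_sub_cancel]
  rw [hf]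

theorem foldl_max_repzero : ∀ c : Nat, (List.replicate c (0 : Int)).foldl max 0 = 0 := by
  intro c
  induction c with
  | zero => rfl
  | succ c ih => rw [List.replicate_succ, List.foldl_cons, max_self]; exact ih

theorem headD_eq (table : List (List Int)) :
    (PySem.List.pyGet? table 0).getD [] = table.headD [] := by
  cases table with
  | nil => rfl
  | cons x xs => rw [PySem.List.pyGet?_zero_cons]; rfl

theorem maxrep (c : Nat) :
    (PySem.List.max? (List.replicate c (0 : Int)) (fun y => y)).getD 0 = 0 := by
  cases c with
  | zero => rfl
  | succ c =>
    rw [List.replicate_succ, PySem.List.max?_id_cons, Option.getD_some, foldl_max_repzero]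

theorem pyfoldBmach (table : List (List Int)) (perm : List Int) (c : Nat)
    (st0 : List Int × Int) :
    (PySem.List.pyRange 1 (((c + 1 : Nat) : Int)) 1).foldl (fun (st : List Int × Int) j =>
        let col := (perm.zip st.1).foldl (fun (acc : List Int × Int) ip =>
            let cc := max acc.2 ip.2 +
              PySem.List.pyGetD (PySem.List.pyGetD table (ip.1 - 1) []) j 0
            (acc.1 ++ [cc], cc)) ([], 0)
        (col.1, max st.2 col.2)) st0
      = (List.range' 1 c).foldl (GB table perm) st0 := by
  rw [PySem.List.pyRange_one]
  have e0 : ((((c + 1 : Nat) : Int)) - 1).toNat = c := by push_cast; omega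
  rw [e0, List.foldl_map, List.range'_eq_map_range, List.foldl_map]
  have hf : (fun (st : List Int × Int) (k : Nat) =>
      let col := (perm.zip st.1).foldl (fun (acc : List Int × Int) ip =>
          let cc := max acc.2 ip.2 +
            PySem.List.pyGetD (PySem.List.pyGetD table (ip.1 - 1) []) (1 + (k : Int)) 0
          (acc.1 ++ [cc], cc)) ([], 0)
      (col.1, max st.2 col.2))
      = (fun st k => GB table perm st (1 + k)) := by
    funext st k
    have e1 : (1 + (k : Int)) = (((1 + k : Nat) : Int)) := by push_cast; ring
    simp only [e1, GB, gfunD, PySem.List.pyGetD_natCast, List.getD_eq_getElem?_getD]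
  rw [hf]

-- ===== VERDICT (by name: the statement is the Claim_ definition above) =====
theorem calculate_spec : Claim_equal_calculate := by
  intro perm table _hdom hpre
  unfold Spec_calculate
  obtain ⟨hne, hnm0, -⟩ := hpre
  rw [calculate, calculate_alt]
  by_cases hperm : perm = []
  · subst hperm
    rw [if_pos rfl, List.foldl_nil]
    exact maxrep _
  · rw [if_neg hperm]
    have hnm0' : 0 < ((PySem.List.pyGet? table 0).getD []).length := by
      rw [headD_eq]; exact hnm0
    obtain ⟨c, hc⟩ : ∃ c, ((PySem.List.pyGet? table 0).getD []).length = c + 1 :=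
      ⟨((PySem.List.pyGet? table 0).getD []).length - 1, by omega⟩
    -- A side: normalise the inner loop, run the job-major invariant
    simp only [pyfoldA]
    have houter := outerA table perm ((PySem.List.pyGet? table 0).getD []).length perm 0
      (List.replicate ((PySem.List.pyGet? table 0).getD []).length 0) List.drop_zero
      (Nat.zero_le _) (by simp)
      (by intro jj hj; rw [Cm]; simp [List.getD_eq_getElem?_getD, hj])
    have hlist : (perm.foldl (fun m i =>
          (List.range' 0 ((PySem.List.pyGet? table 0).getD []).length).foldl (GA table i) m)
          (List.replicate ((PySem.List.pyGet? table 0).getD []).length 0))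
        = (List.range ((PySem.List.pyGet? table 0).getD []).length).map
            (fun jj => Cm (tkD perm table) perm.length jj) := by
      apply List.ext_getElem
      · rw [houter.1]; simp
      · intro jj h1 h2
        have h3 : jj < ((PySem.List.pyGet? table 0).getD []).length := by
          rw [houter.1] at h1; exact h1
        have h4 := houter.2 jj h3
        rw [List.getD_eq_getElem _ _ h1] at h4
        rw [h4]
        simp
    rw [hlist, hc, List.range_eq_range', List.range'_succ, List.map_cons,
      PySem.List.max?_id_cons, Option.getD_some, List.foldl_map]
    -- B side: normalise the two loops, run the machine-major invariants
    have hb1 : (fun (acc : List Int × Int) (i : Int) =>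
        let c := acc.2 + PySem.List.pyGetD (PySem.List.pyGetD table (i - 1) []) 0 0;
        (acc.1 ++ [c], c))
        = (fun (acc : List Int × Int) i =>
            (acc.1 ++ [acc.2 + gfunD table i 0], acc.2 + gfunD table i 0)) := by
      funext acc i
      simp only [gfunD, PySem.List.pyGetD_zero]
    rw [hb1]
    have hfirst := firstB table perm perm 0 ([], 0) List.drop_zero (Nat.zero_le _)
      (by simp) (by rw [Cm])
    rw [hfirst.1, hfirst.2]
    rw [show (PySem.List.pyGetD table 0 []) = (PySem.List.pyGet? table 0).getD [] from rfl, hc]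
    rw [pyfoldBmach]
    have hm := machB table perm c 0
      ((List.range perm.length).map (fun k' => Cm (tkD perm table) (k' + 1) 0),
        Cm (tkD perm table) perm.length 0) rfl rfl
    simp only [Nat.zero_add] at hm
    rw [hm.2, bestVal]
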